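-- pv_equiv track=rewrite | github.com/FranciscoPDNeto/NimGame | main.py | verifyLostSituation
-- ===== SOURCE A (Python) =====
-- def verifyLostSituation(matchsticksByLine):
-- 	hasJustOne = 0
-- 	lostSituation = 1
-- 	for x in matchsticksByLine:
-- 		if(x != 0):
-- 			if( x == 1 and hasJustOne == 0):
-- 				hasJustOne = 1
-- 			else:
-- 				lostSituation = 0
-- 				break
-- 	return lostSituation
-- ===== SOURCE B (Python) =====
-- def verifyLostSituation(matchsticksByLine):
--     nonzero = [x for x in matchsticksByLine if x != 0]
--     if nonzero == [] or nonzero == [1]: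
--         return 1
--     return 0
-- ===== Notes on version B (the rewrite author's own statement) =====
-- stated objective: simpler
-- what changed: Replaced A's single-pass state machine (hasJustOne flag with early break) by a filter-then-inspect decomposition: collect the nonzero rows and return 1 exactly when that collection is [] or [1].
import Mathlib
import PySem

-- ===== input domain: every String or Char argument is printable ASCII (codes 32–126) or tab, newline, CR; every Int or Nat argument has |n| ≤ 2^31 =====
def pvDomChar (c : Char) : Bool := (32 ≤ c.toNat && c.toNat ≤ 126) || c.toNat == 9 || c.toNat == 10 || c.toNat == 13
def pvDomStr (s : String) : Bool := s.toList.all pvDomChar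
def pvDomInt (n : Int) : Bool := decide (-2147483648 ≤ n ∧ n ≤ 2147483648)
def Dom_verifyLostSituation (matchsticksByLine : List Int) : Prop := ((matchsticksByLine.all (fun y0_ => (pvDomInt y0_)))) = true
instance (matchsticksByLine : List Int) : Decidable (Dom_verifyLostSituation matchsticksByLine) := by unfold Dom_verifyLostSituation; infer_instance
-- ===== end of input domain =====

-- B replaces A's flag-and-break state machine by filtering the nonzero rows and inspecting the result (simpler decomposition).
-- ===== PORT A =====
-- loop over matchsticksByLine carrying hasJustOne; break is modelled by returning 0 immediately.
def verifyLostSituationLoop (xs : List Int) (hasJustOne : Int) : Int :=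
  match xs with
  | [] => 1
  | x :: rest =>
    if x ≠ 0 then
      if x = 1 ∧ hasJustOne = 0 then verifyLostSituationLoop rest 1
      else 0
    else verifyLostSituationLoop rest hasJustOne

def verifyLostSituation (matchsticksByLine : List Int) : Int :=
  verifyLostSituationLoop matchsticksByLine 0

-- ===== PORT B =====
def verifyLostSituation_alt (matchsticksByLine : List Int) : Int :=
  let nonzero := matchsticksByLine.filter (fun x => x ≠ 0)
  if nonzero = [] ∨ nonzero = [1] then 1 else 0

-- ===== PRECONDITION & SPEC =====
def Spec_verifyLostSituation (matchsticksByLine : List Int) (out : Int) : Prop := out = verifyLostSituation_alt matchsticksByLine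
instance (matchsticksByLine : List Int) (out : Int) : Decidable (Spec_verifyLostSituation matchsticksByLine out) := by unfold Spec_verifyLostSituation; infer_instance

-- ===== CLAIM (what is proved, stated in full; the proofs are below) =====
def Claim_equal_verifyLostSituation : Prop := ∀ (matchsticksByLine : List Int), Dom_verifyLostSituation matchsticksByLine → Spec_verifyLostSituation matchsticksByLine (verifyLostSituation matchsticksByLine)

-- ===== LEMMAS AND PROOFS =====

-- after the flag is set, the loop returns 1 iff no further nonzero entry occurs
theorem loop_one (xs : List Int) :
    verifyLostSituationLoop xs 1 = if xs.filter (fun x => x ≠ 0) = [] then 1 else 0 := by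
  induction xs with
  | nil => simp [verifyLostSituationLoop]
  | cons x rest ih =>
    by_cases hx : x = 0 <;> simp [verifyLostSituationLoop, hx, ih]

theorem loop_zero (xs : List Int) :
    verifyLostSituationLoop xs 0 =
      if xs.filter (fun x => x ≠ 0) = [] ∨ xs.filter (fun x => x ≠ 0) = [1] then 1 else 0 := by
  induction xs with
  | nil => simp [verifyLostSituationLoop]
  | cons x rest ih =>
    by_cases hx : x = 0
    · simp [verifyLostSituationLoop, hx, ih]
    · by_cases h1 : x = 1
      · simp [verifyLostSituationLoop, h1, loop_one]
      · simp [verifyLostSituationLoop, hx, h1]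

-- ===== VERDICT (by name: the statement is the Claim_ definition above) =====
theorem verifyLostSituation_spec : Claim_equal_verifyLostSituation := by
  intro l _
  unfold Spec_verifyLostSituation verifyLostSituation verifyLostSituation_alt
  simp [loop_zero]
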